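-- pv_equiv track=rewrite | github.com/omermad73/Computer-Networks-Design-Project | tests.py | top_prioritys
-- ===== SOURCE A (Python) =====
-- def top_prioritys(queues, queue_num=0):
--     tupel_packets = queues#[queue_num]
--     used_proritys = {}
--     for packet in tupel_packets:
--         if packet[0] not in used_proritys:
--             used_proritys[packet[0]] = packet
--         elif used_proritys[packet[0]][1] > packet[1]:
--             used_proritys[packet[0]] = packet
--
--     return used_proritys
-- ===== SOURCE B (Python) =====
-- def top_prioritys(queues, queue_num=0):
--     groups = {}
--     for packet in queues:
--         groups.setdefault(packet[0], []).append(packet)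
--     return {prio: min(group, key=lambda p: p[1]) for prio, group in groups.items()}
-- ===== Notes on version B (the rewrite author's own statement) =====
-- stated objective: alternative
-- what changed: B separates the work into two passes - first grouping packets into a dict of lists keyed by priority, then taking the first minimum-by-second-field of each group with min() - instead of A's single pass that maintains the running minimum per key inline.
import Mathlib
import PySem

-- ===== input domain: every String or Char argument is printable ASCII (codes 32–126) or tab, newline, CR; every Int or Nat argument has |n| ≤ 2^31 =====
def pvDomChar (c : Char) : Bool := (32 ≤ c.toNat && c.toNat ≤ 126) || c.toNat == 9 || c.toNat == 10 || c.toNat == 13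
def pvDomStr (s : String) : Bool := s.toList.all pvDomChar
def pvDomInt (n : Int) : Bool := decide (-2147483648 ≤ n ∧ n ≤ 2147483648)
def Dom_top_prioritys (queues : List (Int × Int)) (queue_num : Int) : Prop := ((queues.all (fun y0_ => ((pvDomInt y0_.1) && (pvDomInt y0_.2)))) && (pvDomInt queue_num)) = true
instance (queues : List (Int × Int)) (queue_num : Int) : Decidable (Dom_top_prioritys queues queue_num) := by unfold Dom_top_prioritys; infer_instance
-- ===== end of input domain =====

-- B replaces A's single pass with an inline running minimum per key by two passes: group packets
-- into a dict of lists per priority, then take each group's first minimum by second field (objective: alternative).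

-- ===== PORT A =====
-- loop body of A: first branch 'packet[0] not in used_proritys', else compare stored packet's [1]
def top_prioritysStep (d : PySem.Dict Int (Int × Int)) (packet : Int × Int) : PySem.Dict Int (Int × Int) :=
  match d.get? packet.1 with
  | none => d.insert packet.1 packet
  | some cur => if cur.2 > packet.2 then d.insert packet.1 packet else d

def top_prioritys (queues : List (Int × Int)) (queue_num : Int) : List (Int × Int × Int) :=
  (queues.foldl top_prioritysStep PySem.Dict.empty).items

-- ===== PORT B =====
-- Python B's min(group, key=...) is ported as PySem.List.minD with a dummy default (0, 0);
-- every group is nonempty, so the default is never used (exact as in Python, where min never sees []).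
def top_prioritys_alt (queues : List (Int × Int)) (queue_num : Int) : List (Int × Int × Int) :=
  let groups := queues.foldl (fun d p => d.modify p.1 [] (fun g => g ++ [p])) PySem.Dict.empty
  groups.items.map (fun kg => (kg.1, PySem.List.minD kg.2 (fun q => q.2) (0, 0)))

-- ===== PRECONDITION & SPEC =====
def Spec_top_prioritys (queues : List (Int × Int)) (queue_num : Int) (out : List (Int × Int × Int)) : Prop := out = top_prioritys_alt queues queue_num
instance (queues : List (Int × Int)) (queue_num : Int) (out : List (Int × Int × Int)) : Decidable (Spec_top_prioritys queues queue_num out) := by unfold Spec_top_prioritys; infer_instance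

-- ===== CLAIM (what is proved, stated in full; the proofs are below) =====
def Claim_equal_top_prioritys : Prop := ∀ (queues : List (Int × Int)) (queue_num : Int), Dom_top_prioritys queues queue_num → Spec_top_prioritys queues queue_num (top_prioritys queues queue_num)

-- ===== LEMMAS AND PROOFS =====

-- the projection B applies to each group entry
def pvF (kg : Int × List (Int × Int)) : Int × Int × Int :=
  (kg.1, PySem.List.minD kg.2 (fun q => q.2) (0, 0))

-- the loop body of B's grouping pass
def pvStepG (d : PySem.Dict Int (List (Int × Int))) (p : Int × Int) : PySem.Dict Int (List (Int × Int)) :=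
  d.modify p.1 [] (fun g => g ++ [p])

theorem pvFind_map (p1 : Int) (l : List (Int × List (Int × Int))) :
    List.find? (fun q => q.1 == p1) (l.map pvF) = Option.map pvF (List.find? (fun q => q.1 == p1) l) := by
  induction l with
  | nil => simp
  | cons a t ih => by_cases h : a.1 == p1 <;> simp [List.find?, pvF, h, ih]

theorem pvMin_append (g : List (Int × Int)) (p m : Int × Int)
    (h : PySem.List.min? g (fun q => q.2) = some m) :
    PySem.List.min? (g ++ [p]) (fun q => q.2) = some (if m.2 > p.2 then p else m) := by
  simp only [PySem.List.min?] at h ⊢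
  rw [List.foldl_append, h]
  simp only [List.foldl]
  by_cases hc : p.2 < m.2
  · simp [hc]
  · simp [hc]

theorem pvKeyEq {l : List (Int × List (Int × Int))} (hnd : (l.map Prod.fst).Nodup)
    {a b : Int × List (Int × Int)} (ha : a ∈ l) (hb : b ∈ l) (h : a.1 = b.1) : a = b :=
  List.inj_on_of_nodup_map hnd ha hb h

theorem pvStep_comm (p : Int × Int) (l : List (Int × List (Int × Int)))
    (hne : ∀ kg ∈ l, kg.2 ≠ []) (hnd : (l.map Prod.fst).Nodup) :
    top_prioritysStep ⟨l.map pvF⟩ p = ⟨(pvStepG ⟨l⟩ p).items.map pvF⟩ ∧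
    (∀ kg ∈ (pvStepG ⟨l⟩ p).items, kg.2 ≠ []) ∧
    ((pvStepG ⟨l⟩ p).items.map Prod.fst).Nodup := by
  have hcontains : ∀ {ν : Type} (m : List (Int × ν)),
      m.any (fun q => q.1 == p.1) = (List.find? (fun q => q.1 == p.1) m).isSome := by
    intro ν m; induction m with
    | nil => simp
    | cons a t ih => by_cases h : a.1 == p.1 <;> simp [List.find?, h, ih]
  cases hfind : List.find? (fun q => q.1 == p.1) l with
  | none =>
    have hnotmem : p.1 ∉ l.map Prod.fst := by
      intro hm
      obtain ⟨q, hq, hq1⟩ := List.mem_map.mp hm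
      have := List.find?_eq_none.mp hfind q hq
      simp [hq1] at this
    constructor
    · -- both sides append
      simp only [top_prioritysStep, pvStepG, PySem.Dict.modify, PySem.Dict.get?,
        PySem.Dict.getD, PySem.Dict.insert, PySem.Dict.contains,
        pvFind_map, hfind, hcontains, Option.map_none, Option.getD, Option.isSome]
      simp [pvF, PySem.List.minD, PySem.List.min?]
    · constructor
      · intro kg hkg
        simp only [pvStepG, PySem.Dict.modify, PySem.Dict.getD, PySem.Dict.get?,
          PySem.Dict.insert, PySem.Dict.contains, hfind, hcontains,
          Option.map_none, Option.getD, Option.isSome] at hkg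
        simp at hkg
        rcases hkg with h | h
        · exact hne kg h
        · simp [h]
      · simp only [pvStepG, PySem.Dict.modify, PySem.Dict.getD, PySem.Dict.get?,
          PySem.Dict.insert, PySem.Dict.contains, hfind, hcontains,
          Option.map_none, Option.getD, Option.isSome]
        simp [List.nodup_append, hnd]
        intro a x hax ha
        exact hnotmem (List.mem_map.mpr ⟨(a, x), hax, ha⟩)
  | some kg0 =>
    obtain ⟨k, g⟩ := kg0
    have hmem : (k, g) ∈ l := List.mem_of_find?_eq_some hfind
    have hkp : k = p.1 := by
      have := List.find?_some hfind; simpa using this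
    have hgne : g ≠ [] := hne (k, g) hmem
    obtain ⟨m, hm⟩ : ∃ m, PySem.List.min? g (fun q => q.2) = some m := by
      cases h : PySem.List.min? g (fun q => q.2) with
      | none => exact absurd ((PySem.List.min?_eq_none_iff g _).mp h) hgne
      | some m => exact ⟨m, rfl⟩
    have hval : PySem.List.minD g (fun q => q.2) (0, 0) = m := by
      simp [PySem.List.minD, hm]
    -- the unique entry of l with key p.1 is (k, g)
    have huniq : ∀ q ∈ l, q.1 = p.1 → q = (k, g) := by
      intro q hq hq1
      exact pvKeyEq hnd hq hmem (by rw [hq1, hkp])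
    have hminapp : PySem.List.minD (g ++ [p]) (fun q => q.2) (0, 0)
        = if m.2 > p.2 then p else m := by
      simp [PySem.List.minD, pvMin_append g p m hm]
    constructor
    · -- A's step equals mapped G step
      simp only [top_prioritysStep, pvStepG, PySem.Dict.modify, PySem.Dict.get?,
        PySem.Dict.getD, PySem.Dict.insert, PySem.Dict.contains,
        pvFind_map, hfind, hcontains, Option.map_some, Option.getD, Option.isSome, if_true]
      simp only [pvF, hval]
      by_cases hgt : m.2 > p.2
      · rw [if_pos hgt]
        congr 1
        simp only [List.map_map]
        apply List.map_congr_left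
        intro q hq
        by_cases h : (q.1 == p.1) = true
        · have hq' := huniq q hq (by exact eq_of_beq h)
          subst hq'
          simp [Function.comp, pvF, hkp, hminapp, hgt]
        · have h' : ¬ q.1 = p.1 := by simpa using h
          simp [Function.comp, pvF, h']
      · rw [if_neg hgt]
        congr 1
        simp only [List.map_map]
        apply List.map_congr_left
        intro q hq
        by_cases h : (q.1 == p.1) = true
        · have hq' := huniq q hq (by exact eq_of_beq h)
          subst hq'
          simp [Function.comp, pvF, hkp, hval, hminapp, hgt]
        · simp [Function.comp, h]
    · constructor
      · intro q hq
        simp only [pvStepG, PySem.Dict.modify, PySem.Dict.getD, PySem.Dict.get?,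
          PySem.Dict.insert, PySem.Dict.contains, hfind, hcontains,
          Option.map_some, Option.getD, Option.isSome, if_true] at hq
        simp only [List.mem_map] at hq
        obtain ⟨q0, hq0, hq0e⟩ := hq
        by_cases h : (q0.1 == p.1) = true
        · simp only [h, if_pos] at hq0e
          rw [← hq0e]; simp
        · simp only [h] at hq0e
          rw [← hq0e]; exact hne q0 hq0
      · simp only [pvStepG, PySem.Dict.modify, PySem.Dict.getD, PySem.Dict.get?,
          PySem.Dict.insert, PySem.Dict.contains, hfind, hcontains,
          Option.map_some, Option.getD, Option.isSome, if_true]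
        have hkeys : (List.map (fun q => if (q.1 == p.1) = true then (p.1, g ++ [p]) else q) l).map
            Prod.fst = l.map Prod.fst := by
          rw [List.map_map]
          apply List.map_congr_left
          intro q hq
          by_cases h : (q.1 == p.1) = true
          · simp [Function.comp, (eq_of_beq h).symm]
          · simp [Function.comp, h]
        rw [hkeys]; exact hnd

theorem pvFold_comm (qs : List (Int × Int)) :
    ∀ (l : List (Int × List (Int × Int))),
    (∀ kg ∈ l, kg.2 ≠ []) → ((l.map Prod.fst).Nodup) →
    (qs.foldl top_prioritysStep ⟨l.map pvF⟩).items
      = ((qs.foldl pvStepG ⟨l⟩).items).map pvF := by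
  induction qs with
  | nil => intro l _ _; rfl
  | cons p t ih =>
    intro l h1 h2
    obtain ⟨he, hn, hd⟩ := pvStep_comm p l h1 h2
    simp only [List.foldl_cons]
    rw [he]
    exact ih ((pvStepG ⟨l⟩ p).items) hn hd

-- ===== VERDICT (by name: the statement is the Claim_ definition above) =====
theorem top_prioritys_spec : Claim_equal_top_prioritys := by
  intro queues queue_num _
  unfold Spec_top_prioritys top_prioritys top_prioritys_alt
  have h := pvFold_comm queues [] (by simp) (by simp)
  simpa [pvStepG, pvF, PySem.Dict.empty] using h
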